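-- pv_equiv track=rewrite | github.com/ulaszewski/simple_scripts | somatic_bins.py | count_occurrences_by_category
-- ===== SOURCE A (Python) =====
-- def count_occurrences_by_category(data, category_max_values, interval_size):
--     results = {}
--
--     for category, max_val in category_max_values.items():
--         interval_counts = {i: 0 for i in range(0, max_val, interval_size)}
--         filtered_data = [entry for entry in data if entry[0] == category]
--         for _, number, value in filtered_data:
--             if value > 0 and 0 <= number < max_val:
--                 interval = (number // interval_size) * interval_size
--                 if interval in interval_counts:
--                     interval_counts[interval] += 1
--         results[category] = interval_counts
--
--     return results
-- ===== SOURCE B (Python) =====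
-- def count_occurrences_by_category(data, category_max_values, interval_size):
--     # One pass over the data building a (category, interval) counter, then
--     # assemble each category's bins by dictionary lookup.
--     counts = {}
--     for category, number, value in data:
--         if value > 0 and category in category_max_values and 0 <= number < category_max_values[category]:
--             key = (category, (number // interval_size) * interval_size)
--             counts[key] = counts.get(key, 0) + 1
--     return {category: {i: counts.get((category, i), 0)
--                        for i in range(0, max_val, interval_size)}
--             for category, max_val in category_max_values.items()}
-- ===== Notes on version B (the rewrite author's own statement) =====
-- stated objective: faster
-- what changed: A rescans the whole data list once per category (filter + count); B makes a single pass over the data building a (category, interval)-keyed counter and then assembles each category's bins by dictionary lookup.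
import Mathlib
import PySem

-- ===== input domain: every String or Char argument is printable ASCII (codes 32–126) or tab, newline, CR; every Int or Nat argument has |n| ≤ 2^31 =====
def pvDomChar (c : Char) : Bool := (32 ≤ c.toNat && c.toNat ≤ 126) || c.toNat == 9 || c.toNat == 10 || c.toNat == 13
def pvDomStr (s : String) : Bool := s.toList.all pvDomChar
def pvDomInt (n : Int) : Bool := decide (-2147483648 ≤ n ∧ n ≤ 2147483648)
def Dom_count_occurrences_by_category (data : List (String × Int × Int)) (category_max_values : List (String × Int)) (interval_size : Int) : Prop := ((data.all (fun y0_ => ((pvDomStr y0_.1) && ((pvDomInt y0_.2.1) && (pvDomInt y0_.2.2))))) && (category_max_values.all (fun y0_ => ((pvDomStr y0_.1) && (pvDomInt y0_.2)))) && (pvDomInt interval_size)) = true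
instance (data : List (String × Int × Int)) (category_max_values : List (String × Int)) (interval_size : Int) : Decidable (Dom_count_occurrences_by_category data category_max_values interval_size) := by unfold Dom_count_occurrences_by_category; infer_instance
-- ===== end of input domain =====

-- B replaces A's per-category rescans of the whole data list by a single pass that counts
-- into a (category, interval)-keyed dictionary, then assembles the bins by lookup (faster, asymptotic).

-- ===== PORT A =====
-- dict arguments arrive as association lists; both ports first realise them as a PySem.Dict.
def count_occurrences_by_category (data : List (String × Int × Int)) (category_max_values : List (String × Int)) (interval_size : Int) : List (String × List (Int × Int)) :=
  let cmv := PySem.Dict.ofList category_max_values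
  let results : PySem.Dict String (List (Int × Int)) :=
    cmv.items.foldl (fun results cm =>
      -- interval_counts = {i: 0 for i in range(0, max_val, interval_size)}
      let interval_counts : PySem.Dict Int Int :=
        (PySem.List.pyRange 0 cm.2 interval_size).foldl (fun ic i => ic.insert i 0) PySem.Dict.empty
      -- filtered_data = [entry for entry in data if entry[0] == category]
      let filtered_data := data.filter (fun entry => entry.1 == cm.1)
      let interval_counts :=
        filtered_data.foldl (fun ic e =>
          if 0 < e.2.2 ∧ 0 ≤ e.2.1 ∧ e.2.1 < cm.2 then
            (if ic.contains (PySem.Int.floordiv e.2.1 interval_size * interval_size) then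
              ic.modify (PySem.Int.floordiv e.2.1 interval_size * interval_size) 0 (· + 1)
            else ic)
          else ic) interval_counts
      results.insert cm.1 interval_counts.items) PySem.Dict.empty
  results.items

-- ===== PORT B =====
def count_occurrences_by_category_alt (data : List (String × Int × Int)) (category_max_values : List (String × Int)) (interval_size : Int) : List (String × List (Int × Int)) :=
  let cmv := PySem.Dict.ofList category_max_values
  let counts : PySem.Dict (String × Int) Int :=
    data.foldl (fun counts e =>
      if 0 < e.2.2 ∧ cmv.contains e.1 = true ∧ 0 ≤ e.2.1 ∧ e.2.1 < cmv.getD e.1 0 then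
        counts.insert (e.1, PySem.Int.floordiv e.2.1 interval_size * interval_size)
          (counts.getD (e.1, PySem.Int.floordiv e.2.1 interval_size * interval_size) 0 + 1)
      else counts) PySem.Dict.empty
  cmv.items.map (fun cm =>
    (cm.1, (PySem.List.pyRange 0 cm.2 interval_size).map (fun i => (i, counts.getD (cm.1, i) 0))))

-- ===== PRECONDITION & SPEC =====
-- Pre_ excludes only inputs where Python A raises: interval_size = 0 with a nonempty
-- category dict makes range(0, max_val, 0) raise ValueError (with an empty dict the
-- range is never evaluated and A returns {}).
def Pre_count_occurrences_by_category (data : List (String × Int × Int)) (category_max_values : List (String × Int)) (interval_size : Int) : Prop :=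
  interval_size ≠ 0 ∨ category_max_values = []
instance (data : List (String × Int × Int)) (category_max_values : List (String × Int)) (interval_size : Int) : Decidable (Pre_count_occurrences_by_category data category_max_values interval_size) := by unfold Pre_count_occurrences_by_category; infer_instance

def pvWitness_count_occurrences_by_category : (List (String × Int × Int)) × (List (String × Int)) × Int :=
  ([("a", 3, 1), ("a", 7, 2), ("b", 1, 0)], [("a", 10), ("b", 4)], 5)

def Spec_count_occurrences_by_category (data : List (String × Int × Int)) (category_max_values : List (String × Int)) (interval_size : Int) (out : List (String × List (Int × Int))) : Prop := out = count_occurrences_by_category_alt data category_max_values interval_size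
instance (data : List (String × Int × Int)) (category_max_values : List (String × Int)) (interval_size : Int) (out : List (String × List (Int × Int))) : Decidable (Spec_count_occurrences_by_category data category_max_values interval_size out) := by unfold Spec_count_occurrences_by_category; infer_instance

-- ===== CLAIM (what is proved, stated in full; the proofs are below) =====
def Claim_equal_count_occurrences_by_category : Prop := ∀ (data : List (String × Int × Int)) (category_max_values : List (String × Int)) (interval_size : Int), Dom_count_occurrences_by_category data category_max_values interval_size → Pre_count_occurrences_by_category data category_max_values interval_size → Spec_count_occurrences_by_category data category_max_values interval_size (count_occurrences_by_category data category_max_values interval_size)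

-- ===== LEMMAS AND PROOFS =====

-- range(a, b, s) with s ≠ 0 has no duplicates
theorem pv_nodup_pyRange (a b s : Int) (hs : s ≠ 0) : (PySem.List.pyRange a b s).Nodup := by
  unfold PySem.List.pyRange
  simp only [hs, if_false]
  refine List.Nodup.map ?_ List.nodup_range
  intro x y h
  have hx : s * (x : Int) = s * (y : Int) := add_left_cancel h
  exact_mod_cast mul_left_cancel₀ hs hx

-- A's inner counting loop never changes the key list
theorem pvA_keys (m s : Int) (l : List (String × Int × Int)) :
    ∀ (ic : PySem.Dict Int Int),
    (l.foldl (fun ic e =>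
      if 0 < e.2.2 ∧ 0 ≤ e.2.1 ∧ e.2.1 < m then
        (if ic.contains (PySem.Int.floordiv e.2.1 s * s) then
          ic.modify (PySem.Int.floordiv e.2.1 s * s) 0 (· + 1)
        else ic)
      else ic) ic).keys = ic.keys := by
  induction l with
  | nil => intro ic; rfl
  | cons e l ih =>
    intro ic
    simp only [List.foldl_cons]
    rw [ih]
    by_cases hp : 0 < e.2.2 ∧ 0 ≤ e.2.1 ∧ e.2.1 < m
    · rw [if_pos hp]
      by_cases hc : ic.contains (PySem.Int.floordiv e.2.1 s * s) = true
      · simp only [hc, if_true]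
        rw [PySem.Dict.keys_modify]
        exact PySem.Dict.keys_insert_of_contains _ _ hc
      · simp [hc]
    · simp [hp]

-- value of A's inner loop at a present key = initial value + number of contributing entries
theorem pvA_getD (m s : Int) (l : List (String × Int × Int)) :
    ∀ (ic : PySem.Dict Int Int) (i : Int), ic.contains i = true →
    (l.foldl (fun ic e =>
      if 0 < e.2.2 ∧ 0 ≤ e.2.1 ∧ e.2.1 < m then
        (if ic.contains (PySem.Int.floordiv e.2.1 s * s) then
          ic.modify (PySem.Int.floordiv e.2.1 s * s) 0 (· + 1)
        else ic)
      else ic) ic).getD i 0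
    = ic.getD i 0 + ((l.filter (fun e =>
        decide (0 < e.2.2 ∧ 0 ≤ e.2.1 ∧ e.2.1 < m)
        && decide (PySem.Int.floordiv e.2.1 s * s = i))).length : Int) := by
  induction l with
  | nil => intro ic i _; simp
  | cons e l ih =>
    intro ic i hi
    rw [List.foldl_cons, List.filter_cons]
    by_cases hp : 0 < e.2.2 ∧ 0 ≤ e.2.1 ∧ e.2.1 < m
    · rw [if_pos hp, decide_eq_true hp, Bool.true_and]
      by_cases hk : PySem.Int.floordiv e.2.1 s * s = i
      · rw [decide_eq_true hk, if_pos rfl, hk, if_pos hi]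
        rw [ih _ i (by simp [PySem.Dict.contains_modify, hi]), PySem.Dict.getD_modify_self]
        rw [List.length_cons]
        push_cast; ring
      · rw [decide_eq_false hk]
        simp only [Bool.false_eq_true, if_false]
        by_cases hc : ic.contains (PySem.Int.floordiv e.2.1 s * s) = true
        · rw [if_pos hc, ih _ i (by simp [PySem.Dict.contains_modify, hi])]
          rw [PySem.Dict.getD_modify_of_ne _ _ _ (fun h => hk h.symm)]
        · rw [if_neg (by simpa using hc), ih _ i hi]
    · rw [if_neg hp, decide_eq_false hp, Bool.false_and]
      simp only [Bool.false_eq_true, if_false]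
      rw [ih _ i hi]

-- the zero-initialised interval dict, as a list
theorem pvIC0_items (m s : Int) (hs : s ≠ 0) :
    ((PySem.List.pyRange 0 m s).foldl (fun ic i => ic.insert i 0)
        (PySem.Dict.empty : PySem.Dict Int Int)).items
      = (PySem.List.pyRange 0 m s).map (fun i => (i, (0 : Int))) := by
  simpa using PySem.Dict.items_foldl_insert_fresh (PySem.List.pyRange 0 m s)
    (fun i => i) (fun _ => (0 : Int)) PySem.Dict.empty
    (by intro a _; simp)
    (by simpa using pv_nodup_pyRange 0 m s hs)

theorem pvIC0_keys (m s : Int) (hs : s ≠ 0) :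
    ((PySem.List.pyRange 0 m s).foldl (fun ic i => ic.insert i 0)
        (PySem.Dict.empty : PySem.Dict Int Int)).keys
      = PySem.List.pyRange 0 m s := by
  show (((PySem.List.pyRange 0 m s).foldl (fun ic i => ic.insert i 0)
        (PySem.Dict.empty : PySem.Dict Int Int)).items.map (·.1)) = _
  rw [pvIC0_items m s hs]
  simp [Function.comp_def]

-- value of B's counting loop at any key = initial value + number of contributing entries
theorem pvB_getD (cmv : PySem.Dict String Int) (s : Int) (l : List (String × Int × Int)) :
    ∀ (counts : PySem.Dict (String × Int) Int) (k : String × Int),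
    (l.foldl (fun counts e =>
      if 0 < e.2.2 ∧ cmv.contains e.1 = true ∧ 0 ≤ e.2.1 ∧ e.2.1 < cmv.getD e.1 0 then
        counts.insert (e.1, PySem.Int.floordiv e.2.1 s * s)
          (counts.getD (e.1, PySem.Int.floordiv e.2.1 s * s) 0 + 1)
      else counts) counts).getD k 0
    = counts.getD k 0 + ((l.filter (fun e =>
        decide (0 < e.2.2 ∧ cmv.contains e.1 = true ∧ 0 ≤ e.2.1 ∧ e.2.1 < cmv.getD e.1 0)
        && decide ((e.1, PySem.Int.floordiv e.2.1 s * s) = k))).length : Int) := by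
  induction l with
  | nil => intro counts k; simp
  | cons e l ih =>
    intro counts k
    rw [List.foldl_cons, List.filter_cons]
    by_cases hp : 0 < e.2.2 ∧ cmv.contains e.1 = true ∧ 0 ≤ e.2.1 ∧ e.2.1 < cmv.getD e.1 0
    · rw [if_pos hp, decide_eq_true hp, Bool.true_and]
      by_cases hk : (e.1, PySem.Int.floordiv e.2.1 s * s) = k
      · rw [decide_eq_true hk, if_pos rfl, ih, PySem.Dict.getD_insert, if_pos hk.symm, hk]
        rw [List.length_cons]
        push_cast; ring
      · rw [decide_eq_false hk]
        simp only [Bool.false_eq_true, if_false]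
        rw [ih, PySem.Dict.getD_insert, if_neg (fun h => hk h.symm)]
    · rw [if_neg hp, decide_eq_false hp, Bool.false_and]
      simp only [Bool.false_eq_true, if_false]
      rw [ih]

-- ===== VERDICT (by name: the statement is the Claim_ definition above) =====
theorem count_occurrences_by_category_spec : Claim_equal_count_occurrences_by_category := by
  intro data category_max_values interval_size _hdom hpre
  unfold Spec_count_occurrences_by_category
  rcases hpre with hs | hnil
  case inr =>
    subst hnil
    rfl
  case inl =>
    unfold count_occurrences_by_category count_occurrences_by_category_alt
    set cmv := PySem.Dict.ofList category_max_values with hcmv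
    simp only []
    -- outer loop of A inserts each (fresh) category key once
    rw [PySem.Dict.items_foldl_insert_fresh cmv.items (fun cm => cm.1) _ PySem.Dict.empty
      (by intro a _; simp) (by exact PySem.Dict.nodup_keys_ofList category_max_values)]
    rw [show (PySem.Dict.empty : PySem.Dict String (List (Int × Int))).items = [] from rfl,
      List.nil_append]
    apply List.map_congr_left
    intro cm hcm
    have hknodup : cmv.keys.Nodup := PySem.Dict.nodup_keys_ofList category_max_values
    have hcontains : cmv.contains cm.1 = true :=
      (PySem.Dict.contains_iff_mem_keys cmv cm.1).mpr (PySem.Dict.mem_keys_of_mem_items cmv hcm)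
    have hgetD : cmv.getD cm.1 0 = cm.2 := by
      have := PySem.Dict.getD_of_mem_items cmv (k := cm.1) (v := cm.2) (by simpa using hcm) hknodup 0
      simpa using this
    refine Prod.ext rfl ?_
    -- A's inner dict as a list
    have hfkeys := pvA_keys cm.2 interval_size (data.filter (fun entry => entry.1 == cm.1))
      (((PySem.List.pyRange 0 cm.2 interval_size).foldl (fun ic i => ic.insert i 0) PySem.Dict.empty))
    rw [pvIC0_keys cm.2 interval_size hs] at hfkeys
    rw [PySem.Dict.items_eq_map_keys _ (by rw [hfkeys]; exact pv_nodup_pyRange 0 cm.2 interval_size hs) 0]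
    rw [hfkeys]
    apply List.map_congr_left
    intro i hi
    refine Prod.ext rfl ?_
    have hic0 : ((PySem.List.pyRange 0 cm.2 interval_size).foldl (fun ic i => ic.insert i 0)
        (PySem.Dict.empty : PySem.Dict Int Int)).contains i = true := by
      rw [PySem.Dict.contains_iff_mem_keys, pvIC0_keys cm.2 interval_size hs]; exact hi
    have hic0v : ((PySem.List.pyRange 0 cm.2 interval_size).foldl (fun ic i => ic.insert i 0)
        (PySem.Dict.empty : PySem.Dict Int Int)).getD i 0 = 0 := by
      apply PySem.Dict.getD_of_mem_items _ (v := (0 : Int))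
      · rw [pvIC0_items cm.2 interval_size hs]
        exact List.mem_map_of_mem hi
      · rw [pvIC0_keys cm.2 interval_size hs]; exact pv_nodup_pyRange 0 cm.2 interval_size hs
    rw [pvA_getD cm.2 interval_size _ _ i hic0, hic0v, zero_add]
    rw [pvB_getD cmv interval_size data PySem.Dict.empty (cm.1, i)]
    simp only [PySem.Dict.getD_empty, zero_add]
    congr 1
    rw [List.filter_filter]
    congr 1
    apply List.filter_congr
    intro e _
    by_cases he : e.1 = cm.1
    · simp [he, hcontains, hgetD, Prod.ext_iff]
    · simp [Prod.ext_iff, fun h : e.1 = cm.1 => he h]
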